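-- pv_equiv track=rewrite | github.com/iSamarthDubey/Kartavya-PS-SIH25173.v1 | backend/src/nlp/security_entities.py | _categorize_security_tool
-- ===== SOURCE A (Python) =====
-- def _categorize_security_tool(tool: str) -> str:
--     """Categorize security tool by type"""
--     categories = {
--         "endpoint": ["Windows Defender", "CrowdStrike Falcon", "SentinelOne", "Carbon Black"],
--         "siem": ["Splunk", "QRadar", "ArcSight", "LogRhythm"],
--         "soar": ["Phantom", "Demisto"],
--         "network": ["Wireshark", "Nmap"],
--         "vulnerability": ["Nessus", "OpenVAS", "Qualys"]
--     }
--
--     for category, tools in categories.items():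
--         if tool in tools:
--             return category
--     return "security_tool"
-- ===== SOURCE B (Python) =====
-- _TOOL_TO_CATEGORY = {
--     tool: category
--     for category, tools in {
--         "endpoint": ["Windows Defender", "CrowdStrike Falcon", "SentinelOne", "Carbon Black"],
--         "siem": ["Splunk", "QRadar", "ArcSight", "LogRhythm"],
--         "soar": ["Phantom", "Demisto"],
--         "network": ["Wireshark", "Nmap"],
--         "vulnerability": ["Nessus", "OpenVAS", "Qualys"],
--     }.items()
--     for tool in tools
-- }
--
-- def _categorize_security_tool(tool: str) -> str:
--     """Categorize security tool by type"""
--     return _TOOL_TO_CATEGORY.get(tool, "security_tool")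
-- ===== Notes on version B (the rewrite author's own statement) =====
-- stated objective: simpler
-- what changed: Replaced the lookup-time loop over categories with per-category membership scans by a flat tool->category reverse index built once at module load, so the function body is a single dict lookup with default.
import Mathlib
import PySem

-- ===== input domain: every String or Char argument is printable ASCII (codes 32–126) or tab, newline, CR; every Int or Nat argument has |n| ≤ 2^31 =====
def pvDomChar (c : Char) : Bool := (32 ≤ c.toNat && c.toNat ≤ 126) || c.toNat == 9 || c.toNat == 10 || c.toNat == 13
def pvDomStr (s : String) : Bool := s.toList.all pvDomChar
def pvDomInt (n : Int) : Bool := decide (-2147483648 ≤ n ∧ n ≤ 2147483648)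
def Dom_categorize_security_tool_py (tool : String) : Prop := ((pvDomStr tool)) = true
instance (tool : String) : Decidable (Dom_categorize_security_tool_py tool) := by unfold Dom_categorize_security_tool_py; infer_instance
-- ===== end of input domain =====

-- B replaces A's lookup-time scan over categories by a flat tool->category index built once; same result, simpler lookup.

-- ===== PORT A =====
-- the categories dict (insertion order), as in A
def pvCategoriesA : List (String × List String) :=
  [("endpoint", ["Windows Defender", "CrowdStrike Falcon", "SentinelOne", "Carbon Black"]),
   ("siem", ["Splunk", "QRadar", "ArcSight", "LogRhythm"]),
   ("soar", ["Phantom", "Demisto"]),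
   ("network", ["Wireshark", "Nmap"]),
   ("vulnerability", ["Nessus", "OpenVAS", "Qualys"])]

-- the for-loop with early return
def pvLoopA (tool : String) : List (String × List String) → String
  | [] => "security_tool"
  | (category, tools) :: rest =>
      if tools.contains tool then category else pvLoopA tool rest

def categorize_security_tool_py (tool : String) : String :=
  pvLoopA tool pvCategoriesA

-- ===== PORT B =====
-- the flat reverse index, built once from the same categories table (B's dict comprehension)
def pvToolToCategory : PySem.Dict String String :=
  pvCategoriesA.foldl
    (fun acc p => p.2.foldl (fun acc t => PySem.Dict.insert acc t p.1) acc)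
    PySem.Dict.empty

def categorize_security_tool_py_alt (tool : String) : String :=
  PySem.Dict.getD pvToolToCategory tool "security_tool"

-- ===== PRECONDITION & SPEC =====
def Spec_categorize_security_tool_py (tool : String) (out : String) : Prop := out = categorize_security_tool_py_alt tool
instance (tool : String) (out : String) : Decidable (Spec_categorize_security_tool_py tool out) := by unfold Spec_categorize_security_tool_py; infer_instance

-- ===== CLAIM (what is proved, stated in full; the proofs are below) =====
def Claim_equal_categorize_security_tool_py : Prop := ∀ (tool : String), Dom_categorize_security_tool_py tool → Spec_categorize_security_tool_py tool (categorize_security_tool_py tool)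

-- ===== LEMMAS AND PROOFS =====

-- ===== VERDICT (by name: the statement is the Claim_ definition above) =====
-- the index evaluated: a closed literal, so the kernel can check it
theorem pvToolToCategory_eval : pvToolToCategory = PySem.Dict.mk
    [("Windows Defender", "endpoint"), ("CrowdStrike Falcon", "endpoint"),
     ("SentinelOne", "endpoint"), ("Carbon Black", "endpoint"),
     ("Splunk", "siem"), ("QRadar", "siem"), ("ArcSight", "siem"), ("LogRhythm", "siem"),
     ("Phantom", "soar"), ("Demisto", "soar"),
     ("Wireshark", "network"), ("Nmap", "network"),
     ("Nessus", "vulnerability"), ("OpenVAS", "vulnerability"), ("Qualys", "vulnerability")] := by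
  decide

set_option maxHeartbeats 2000000 in
theorem categorize_security_tool_py_spec : Claim_equal_categorize_security_tool_py := by
  intro tool _
  unfold Spec_categorize_security_tool_py categorize_security_tool_py categorize_security_tool_py_alt
  rw [pvToolToCategory_eval]
  by_cases h0 : tool = "Windows Defender"
  · subst h0; decide
  by_cases h1 : tool = "CrowdStrike Falcon"
  · subst h1; decide
  by_cases h2 : tool = "SentinelOne"
  · subst h2; decide
  by_cases h3 : tool = "Carbon Black"
  · subst h3; decide
  by_cases h4 : tool = "Splunk"
  · subst h4; decide
  by_cases h5 : tool = "QRadar"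
  · subst h5; decide
  by_cases h6 : tool = "ArcSight"
  · subst h6; decide
  by_cases h7 : tool = "LogRhythm"
  · subst h7; decide
  by_cases h8 : tool = "Phantom"
  · subst h8; decide
  by_cases h9 : tool = "Demisto"
  · subst h9; decide
  by_cases h10 : tool = "Wireshark"
  · subst h10; decide
  by_cases h11 : tool = "Nmap"
  · subst h11; decide
  by_cases h12 : tool = "Nessus"
  · subst h12; decide
  by_cases h13 : tool = "OpenVAS"
  · subst h13; decide
  by_cases h14 : tool = "Qualys"
  · subst h14; decide
  simp [pvLoopA, pvCategoriesA, PySem.Dict.getD, PySem.Dict.get?, h0, h1, h2, h3, h4, h5, h6, h7, h8, h9, h10, h11, h12, h13, h14, Ne.symm h0, Ne.symm h1, Ne.symm h2, Ne.symm h3, Ne.symm h4, Ne.symm h5, Ne.symm h6, Ne.symm h7, Ne.symm h8, Ne.symm h9, Ne.symm h10, Ne.symm h11, Ne.symm h12, Ne.symm h13, Ne.symm h14]
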